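-- pv_equiv track=rewrite | github.com/Eremiteb/mytasks | newline_to_space_v1-fix-width.py | compute_top_lengths
-- ===== SOURCE A (Python) =====
-- def line_content_and_eol(line):
--     if line.endswith("\r\n"):
--         return line[:-2], "\r\n"
--     if line.endswith("\n"):
--         return line[:-1], "\n"
--     if line.endswith("\r"):
--         return line[:-1], "\r"
--     return line, ""
--
-- def compute_top_lengths(text, top_n):
--     """
--     ТОП длин строк по частоте среди строк с EOL и len(content) > 0.
--     Сортировка: count DESC, len ASC.
--     """
--     hist = {}
--     for line in text.splitlines(True):
--         content, eol = line_content_and_eol(line)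
--         if not eol:
--             continue
--         L = len(content)
--         if L <= 0:
--             continue  # пустые строки исключаем
--         hist[L] = hist.get(L, 0) + 1
--     items = sorted(hist.items(), key=lambda x: (-x[1], x[0]))
--     return [{"len": int(L), "count": int(c)} for (L, c) in items[:top_n]]
-- ===== SOURCE B (Python) =====
-- def line_content_and_eol(line):
--     if line.endswith("\r\n"):
--         return line[:-2], "\r\n"
--     if line.endswith("\n"):
--         return line[:-1], "\n"
--     if line.endswith("\r"):
--         return line[:-1], "\r"
--     return line, ""
--
-- def compute_top_lengths(text, top_n):
--     # Same extraction/filtering as A, but the frequency table is built by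
--     # sort-and-group (run-length encoding of the sorted length list) instead
--     # of a dict histogram.
--     lengths = []
--     for line in text.splitlines(True):
--         content, eol = line_content_and_eol(line)
--         if eol and len(content) > 0:
--             lengths.append(len(content))
--     lengths.sort()
--     pairs = []
--     for L in lengths:
--         if pairs and pairs[-1][0] == L:
--             last = pairs.pop()
--             pairs.append((L, last[1] + 1))
--         else:
--             pairs.append((L, 1))
--     pairs.sort(key=lambda p: (-p[1], p[0]))
--     return [{"len": int(L), "count": int(c)} for (L, c) in pairs[:top_n]]
-- ===== Notes on version B (the rewrite author's own statement) =====
-- stated objective: alternative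
-- what changed: The frequency table is built by sorting the list of qualifying line lengths and run-length-encoding the sorted list (sort-and-group) instead of accumulating a dict histogram.
import Mathlib
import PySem

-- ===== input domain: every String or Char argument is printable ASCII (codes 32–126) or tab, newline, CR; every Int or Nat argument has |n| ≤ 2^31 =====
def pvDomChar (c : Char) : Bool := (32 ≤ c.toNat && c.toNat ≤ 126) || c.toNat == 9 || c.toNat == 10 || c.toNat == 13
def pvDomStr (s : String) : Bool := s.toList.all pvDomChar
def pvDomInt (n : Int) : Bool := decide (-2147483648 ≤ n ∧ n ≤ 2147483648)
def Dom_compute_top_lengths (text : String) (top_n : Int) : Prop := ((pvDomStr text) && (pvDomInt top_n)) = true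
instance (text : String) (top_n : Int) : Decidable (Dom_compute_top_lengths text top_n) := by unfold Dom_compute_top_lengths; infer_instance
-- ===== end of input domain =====

-- B builds the frequency table by sort-and-group (run-length encoding of the sorted
-- length list) instead of A's dict histogram; same results, similar cost (objective: alternative).

-- ===== PORT A =====
-- hand port of text.splitlines(True) (keepends): exact on Dom, whose only
-- line-break characters are '\n', '\r' and "\r\n" (Python also breaks on
-- \x0b, \x0c, … which Dom excludes)
def splitKeep (acc : List Char) : List Char → List (List Char)
  | [] => if acc = [] then [] else [acc.reverse]
  | '\r' :: '\n' :: rest => (acc.reverse ++ ['\r', '\n']) :: splitKeep [] rest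
  | c :: rest =>
      if c = '\n' ∨ c = '\r' then (acc.reverse ++ [c]) :: splitKeep [] rest
      else splitKeep (c :: acc) rest

-- port of line_content_and_eol (lines as List Char)
def lineContentAndEol (line : List Char) : List Char × List Char :=
  if PySem.Chars.endswith line ['\r', '\n'] then (PySem.List.slice line none (some (-2)), ['\r', '\n'])
  else if PySem.Chars.endswith line ['\n'] then (PySem.List.slice line none (some (-1)), ['\n'])
  else if PySem.Chars.endswith line ['\r'] then (PySem.List.slice line none (some (-1)), ['\r'])
  else (line, [])

def compute_top_lengths (text : String) (top_n : Int) : List (List (String × Int)) :=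
  let hist : PySem.Dict Int Int :=
    (splitKeep [] text.toList).foldl
      (fun d line =>
        if (lineContentAndEol line).2 = [] then d
        else if PySem.List.len (lineContentAndEol line).1 ≤ 0 then d
        else d.insert (PySem.List.len (lineContentAndEol line).1)
              (d.getD (PySem.List.len (lineContentAndEol line).1) 0 + 1))
      PySem.Dict.empty
  let items := PySem.List.sorted2 hist.items (fun x => -x.2) (fun x => x.1)
  (PySem.List.slice items none (some top_n)).map (fun p => [("len", p.1), ("count", p.2)])

-- ===== PORT B =====
def compute_top_lengths_alt (text : String) (top_n : Int) : List (List (String × Int)) :=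
  let lengths : List Int :=
    (splitKeep [] text.toList).foldl
      (fun acc line =>
        if (lineContentAndEol line).2 ≠ [] ∧ 0 < PySem.List.len (lineContentAndEol line).1 then
          acc ++ [PySem.List.len (lineContentAndEol line).1]
        else acc)
      []
  let sortedL := PySem.List.sorted lengths (fun x => x)
  let pairs : List (Int × Int) :=
    sortedL.foldl
      (fun ps L =>
        match ps.getLast? with
        | some last => if last.1 = L then ps.dropLast ++ [(L, last.2 + 1)] else ps ++ [(L, 1)]
        | none => ps ++ [(L, 1)])
      []
  let pairs2 := PySem.List.sorted2 pairs (fun p => -p.2) (fun p => p.1)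
  (PySem.List.slice pairs2 none (some top_n)).map (fun p => [("len", p.1), ("count", p.2)])

-- ===== PRECONDITION & SPEC =====
def Spec_compute_top_lengths (text : String) (top_n : Int) (out : List (List (String × Int))) : Prop := out = compute_top_lengths_alt text top_n
instance (text : String) (top_n : Int) (out : List (List (String × Int))) : Decidable (Spec_compute_top_lengths text top_n out) := by unfold Spec_compute_top_lengths; infer_instance

-- ===== CLAIM (what is proved, stated in full; the proofs are below) =====
def Claim_equal_compute_top_lengths : Prop := ∀ (text : String) (top_n : Int), Dom_compute_top_lengths text top_n → Spec_compute_top_lengths text top_n (compute_top_lengths text top_n)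


-- ===== LEMMAS AND PROOFS =====

def gstep (ps : List (Int × Int)) (L : Int) : List (Int × Int) :=
  match ps.getLast? with
  | some last => if last.1 = L then ps.dropLast ++ [(L, last.2 + 1)] else ps ++ [(L, 1)]
  | none => ps ++ [(L, 1)]

theorem lens_acc (lines : List (List Char)) (acc : List Int) :
    lines.foldl
      (fun acc line =>
        if (lineContentAndEol line).2 ≠ [] ∧ 0 < PySem.List.len (lineContentAndEol line).1 then
          acc ++ [PySem.List.len (lineContentAndEol line).1]
        else acc)
      acc
    = acc ++ lines.foldl
      (fun acc line =>
        if (lineContentAndEol line).2 ≠ [] ∧ 0 < PySem.List.len (lineContentAndEol line).1 then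
          acc ++ [PySem.List.len (lineContentAndEol line).1]
        else acc)
      [] := by
  induction lines generalizing acc with
  | nil => simp
  | cons l ls ih =>
      simp only [List.foldl_cons]
      rw [ih, ih (if (lineContentAndEol l).2 ≠ [] ∧ 0 < PySem.List.len (lineContentAndEol l).1 then
        ([] : List Int) ++ [PySem.List.len (lineContentAndEol l).1] else [])]
      split <;> simp

theorem foldA_eq (lines : List (List Char)) (d : PySem.Dict Int Int) :
    lines.foldl
      (fun d line =>
        if (lineContentAndEol line).2 = [] then d
        else if PySem.List.len (lineContentAndEol line).1 ≤ 0 then d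
        else d.insert (PySem.List.len (lineContentAndEol line).1)
              (d.getD (PySem.List.len (lineContentAndEol line).1) 0 + 1))
      d
    = (lines.foldl
        (fun acc line =>
          if (lineContentAndEol line).2 ≠ [] ∧ 0 < PySem.List.len (lineContentAndEol line).1 then
            acc ++ [PySem.List.len (lineContentAndEol line).1]
          else acc)
        []).foldl (fun d x => d.insert x (d.getD x 0 + 1)) d := by
  induction lines generalizing d with
  | nil => simp
  | cons l ls ih =>
      have hlen : PySem.List.len (lineContentAndEol l).1 = ((lineContentAndEol l).1.length : Int) := PySem.List.len_eq _
      have hstep : ∀ d : PySem.Dict Int Int,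
          (if (lineContentAndEol l).2 = [] then d
           else if PySem.List.len (lineContentAndEol l).1 ≤ 0 then d
           else d.insert (PySem.List.len (lineContentAndEol l).1)
                 (d.getD (PySem.List.len (lineContentAndEol l).1) 0 + 1))
          = List.foldl (fun d x => d.insert x (d.getD x 0 + 1)) d
              (if (lineContentAndEol l).2 ≠ [] ∧ 0 < PySem.List.len (lineContentAndEol l).1 then
                ([] : List Int) ++ [PySem.List.len (lineContentAndEol l).1]
              else []) := by
        intro d
        by_cases h1 : (lineContentAndEol l).2 = []
        · simp [h1]
        · by_cases h2 : PySem.List.len (lineContentAndEol l).1 ≤ 0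
          · have hnpos : ¬ (0 < PySem.List.len (lineContentAndEol l).1) := by omega
            rw [if_neg h1, if_pos h2, if_neg (by tauto)]
            simp
          · have hpos : 0 < PySem.List.len (lineContentAndEol l).1 := by omega
            rw [if_neg h1, if_neg h2, if_pos ⟨h1, hpos⟩]
            simp
      simp only [List.foldl_cons]
      rw [ih, lens_acc ls (if (lineContentAndEol l).2 ≠ [] ∧ 0 < PySem.List.len (lineContentAndEol l).1 then
        ([] : List Int) ++ [PySem.List.len (lineContentAndEol l).1] else []), List.foldl_append, ← hstep d]

theorem group_inv (zs : List Int) (hs : zs.Pairwise (· ≤ ·)) :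
    ((zs.foldl gstep []).map Prod.fst).Pairwise (· < ·)
  ∧ (∀ k, k ∈ (zs.foldl gstep []).map Prod.fst ↔ k ∈ zs)
  ∧ (∀ p ∈ zs.foldl gstep [], p.2 = (zs.count p.1 : Int))
  ∧ (∀ p, (zs.foldl gstep []).getLast? = some p → ∀ x ∈ zs, x ≤ p.1) := by
  induction zs using List.reverseRecOn with
  | nil => simp
  | append_singleton zs L ih =>
      rw [List.pairwise_append] at hs
      obtain ⟨hzs, -, hle⟩ := hs
      have hle : ∀ x ∈ zs, x ≤ L := fun x hx => hle x hx L (by simp)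
      obtain ⟨h1, h2, h3, h4⟩ := ih hzs
      rw [List.foldl_append, List.foldl_cons, List.foldl_nil]
      set ps := zs.foldl gstep [] with hps
      match hlast : ps.getLast? with
      | none =>
          have hpse : ps = [] := List.getLast?_eq_none_iff.mp hlast
          have hzse : zs = [] := by
            rw [hpse] at h2
            simp only [List.map_nil, List.not_mem_nil, false_iff] at h2
            exact List.eq_nil_iff_forall_not_mem.mpr h2
          have hg : gstep ps L = [(L, 1)] := by
            unfold gstep; rw [hlast]; simp [hpse]
          rw [hg, hzse]
          refine ⟨by simp, by simp, by simp, by simp⟩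
      | some last =>
          have hne : ps ≠ [] := by intro h; rw [h] at hlast; simp at hlast
          have hdec : ps = ps.dropLast ++ [last] := by
            conv_lhs => rw [← List.dropLast_append_getLast hne]
            rw [List.getLast?_eq_some_getLast hne] at hlast
            simp only [Option.some.injEq] at hlast
            rw [hlast]
          have hmemk : last.1 ∈ zs := by
            rw [← h2]
            exact List.mem_map_of_mem (by rw [hdec]; simp)
          have hkL : last.1 ≤ L := hle _ hmemk
          have hfstlt : ∀ x ∈ ps.dropLast.map Prod.fst, x < last.1 := by
            intro x hx
            have hpw := h1
            rw [hdec, List.map_append, List.pairwise_append] at hpw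
            exact hpw.2.2 x hx last.1 (by simp)
          have hallk : ∀ x ∈ zs, x ≤ last.1 := h4 last hlast
          by_cases heq : last.1 = L
          · have hg : gstep ps L = ps.dropLast ++ [(L, last.2 + 1)] := by
              unfold gstep; rw [hlast]; simp [heq]
            rw [hg]
            have hfst : (ps.dropLast ++ [(L, last.2 + 1)]).map Prod.fst = ps.map Prod.fst := by
              conv_rhs => rw [hdec]
              simp [heq]
            refine ⟨by rw [hfst]; exact h1, ?_, ?_, ?_⟩
            · intro k
              rw [hfst, h2, List.mem_append]
              constructor
              · intro h; exact Or.inl h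
              · rintro (h | h)
                · exact h
                · simp only [List.mem_singleton] at h
                  rw [h, ← heq]; exact hmemk
            · intro p hp
              rcases List.mem_append.mp hp with h | h
              · have hplt : p.1 < last.1 := hfstlt p.1 (List.mem_map_of_mem h)
                have hpne : p.1 ≠ L := by omega
                have hpmem : p ∈ ps := by rw [hdec]; exact List.mem_append_left _ h
                have h0 : List.count p.1 [L] = 0 := List.count_eq_zero.mpr (by simp [hpne])
                rw [List.count_append, h0]
                simp [h3 p hpmem]
              · simp only [List.mem_singleton] at h
                subst h
                have hlp : last ∈ ps := by rw [hdec]; simp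
                have hc := h3 last hlp
                rw [heq] at hc
                have h1c : List.count L [L] = 1 := by simp
                rw [List.count_append, h1c]
                push_cast
                omega
            · intro p hp x hx
              rw [List.getLast?_append, List.getLast?_singleton] at hp
              simp only [Option.some_or, Option.some.injEq] at hp
              subst hp
              simp only [List.mem_append, List.mem_singleton] at hx
              rcases hx with hx | hx
              · simpa using hle x hx
              · rw [hx]
          · have hklt : last.1 < L := lt_of_le_of_ne hkL heq
            have hg : gstep ps L = ps ++ [(L, 1)] := by
              unfold gstep; rw [hlast]; simp [heq]
            rw [hg]
            have hLnot : L ∉ zs := fun h => absurd (hallk L h) (by omega)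
            refine ⟨?_, ?_, ?_, ?_⟩
            · rw [List.map_append, List.pairwise_append]
              refine ⟨h1, by simp, ?_⟩
              intro x hx y hy
              simp only [List.map_cons, List.map_nil, List.mem_singleton] at hy
              subst hy
              have : x ∈ zs := (h2 x).mp hx
              exact lt_of_le_of_lt (hallk x this) hklt
            · intro k
              rw [List.map_append, List.mem_append, h2]
              simp only [List.map_cons, List.map_nil, List.mem_singleton, List.mem_append]
            · intro p hp
              rcases List.mem_append.mp hp with h | h
              · have hpz : p.1 ∈ zs := (h2 p.1).mp (List.mem_map_of_mem h)
                have hpne : p.1 ≠ L := fun hc => hLnot (hc ▸ hpz)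
                have h0 : List.count p.1 [L] = 0 := List.count_eq_zero.mpr (by simp [hpne])
                rw [List.count_append, h0]
                simp [h3 p h]
              · simp only [List.mem_singleton] at h
                subst h
                rw [List.count_append]
                have : zs.count L = 0 := List.count_eq_zero.mpr hLnot
                simp [this]
            · intro p hp x hx
              rw [List.getLast?_append, List.getLast?_singleton] at hp
              simp only [Option.some_or, Option.some.injEq] at hp
              subst hp
              simp only [List.mem_append, List.mem_singleton] at hx
              rcases hx with hx | hx
              · simpa using hle x hx
              · rw [hx]

theorem map_fst_recover (ps : List (Int × Int)) (f : Int → Int)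
    (h : ∀ p ∈ ps, p.2 = f p.1) :
    ps = (ps.map Prod.fst).map (fun k => (k, f k)) := by
  induction ps with
  | nil => rfl
  | cons p t ih =>
      simp only [List.map_cons]
      rw [← ih (fun q hq => h q (List.mem_cons_of_mem _ hq)), ← h p (List.mem_cons_self ..)]

theorem sorted2_eq_lex (xs : List (Int × Int)) :
    PySem.List.sorted2 xs (fun p => -p.2) (fun p => p.1)
      = PySem.List.sorted xs (fun p => toLex (-p.2, p.1)) := by
  unfold PySem.List.sorted2 PySem.List.sorted
  simp only [Bool.false_eq_true, if_false]
  congr 1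
  funext acc x
  congr 1
  funext a b
  rw [Bool.eq_iff_iff]
  simp only [Bool.or_eq_true, Bool.and_eq_true, decide_eq_true_eq,
    Bool.not_eq_true', decide_eq_false_iff_not, Prod.Lex.lt_iff, ofLex_toLex]
  omega

theorem lexkey_inj : Function.Injective (fun p : Int × Int => toLex (-p.2, p.1)) := by
  intro p q h
  have h' : ((-p.2, p.1) : Int × Int) = (-q.2, q.1) := congrArg ofLex h
  simp only [Prod.mk.injEq] at h'
  obtain ⟨h1, h2⟩ := h'
  exact Prod.ext h2 (by omega)

theorem group_perm (lengths : List Int) :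
    ((PySem.List.sorted lengths (fun x => x)).foldl gstep []).Perm
      ((PySem.Set.ofList lengths).map (fun k => (k, (lengths.count k : Int)))) := by
  have hsort : (PySem.List.sorted lengths (fun x => x)).Pairwise (· ≤ ·) := by
    have := PySem.List.sorted_pairwise lengths (fun x => x)
    simpa using this
  obtain ⟨h1, h2, h3, -⟩ := group_inv _ hsort
  set zs := PySem.List.sorted lengths (fun x => x) with hzs
  have hcnt : ∀ k : Int, zs.count k = lengths.count k := fun k =>
    (PySem.List.sorted_perm lengths (fun x => x) false).count_eq k
  have hps : zs.foldl gstep [] = ((zs.foldl gstep []).map Prod.fst).map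
      (fun k => (k, (lengths.count k : Int))) := by
    apply map_fst_recover
    intro p hp
    rw [h3 p hp, hcnt p.1]
  rw [hps]
  apply List.Perm.map
  rw [List.perm_ext_iff_of_nodup]
  · intro a
    rw [h2 a, PySem.Set.mem_ofList, PySem.List.mem_sorted]
  · exact h1.imp (fun h => ne_of_lt h)
  · exact PySem.Set.nodup_ofList lengths

theorem sorted2_items_eq (lengths : List Int) :
    PySem.List.sorted2 ((PySem.Set.ofList lengths).map (fun k => (k, (lengths.count k : Int))))
        (fun x => -x.2) (fun x => x.1)
      = PySem.List.sorted2 ((PySem.List.sorted lengths (fun x => x)).foldl gstep [])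
        (fun p => -p.2) (fun p => p.1) := by
  rw [sorted2_eq_lex, sorted2_eq_lex]
  exact PySem.List.sorted_eq_sorted_of_perm _ _ _ lexkey_inj (group_perm lengths).symm

-- ===== VERDICT (by name: the statement is the Claim_ definition above) =====
theorem compute_top_lengths_spec : Claim_equal_compute_top_lengths := by
  intro text top_n _
  unfold Spec_compute_top_lengths compute_top_lengths compute_top_lengths_alt
  simp only []
  rw [foldA_eq, PySem.Dict.foldl_insert_getD_add_one_eq_counter, PySem.Dict.items_counter]
  rw [show (fun (ps : List (Int × Int)) (L : Int) =>
        match ps.getLast? with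
        | some last => if last.1 = L then ps.dropLast ++ [(L, last.2 + 1)] else ps ++ [(L, 1)]
        | none => ps ++ [(L, 1)]) = gstep from rfl]
  rw [sorted2_items_eq]
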